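-- pv_equiv track=rewrite | github.com/pypi-data/pypi-mirror-255 | packages/npgbq/npgbq-2.1.21.tar.gz/npgbq-2.1.21/npgbq/connectors/npmssql.py | generate_n_sql_var
-- ===== SOURCE A (Python) =====
-- def generate_n_sql_var(num):
--     output = ""
--     for i in range(num):
--         if i == 0:
--             output = "?"
--         else:
--             output = output + ",?"
--     return output
-- ===== SOURCE B (Python) =====
-- def generate_n_sql_var(num):
--     return ("?," * num)[:-1]
-- ===== Notes on version B (the rewrite author's own statement) =====
-- stated objective: simpler
-- what changed: Replaced the index loop with its per-iteration branch by a single closed-form expression: repeat the pattern '?,' num times and slice off the trailing comma.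
import Mathlib
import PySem

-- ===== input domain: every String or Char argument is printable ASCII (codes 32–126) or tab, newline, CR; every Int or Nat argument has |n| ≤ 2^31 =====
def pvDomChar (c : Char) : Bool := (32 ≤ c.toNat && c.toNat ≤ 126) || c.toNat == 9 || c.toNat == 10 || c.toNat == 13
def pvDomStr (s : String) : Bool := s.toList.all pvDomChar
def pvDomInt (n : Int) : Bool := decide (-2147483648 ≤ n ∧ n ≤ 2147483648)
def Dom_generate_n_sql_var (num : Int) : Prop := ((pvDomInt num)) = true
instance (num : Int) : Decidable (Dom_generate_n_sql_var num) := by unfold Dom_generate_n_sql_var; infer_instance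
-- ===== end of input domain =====

-- B replaces A's accumulation loop by a closed form: repeat "?," num times, slice off the last char (simpler).


-- ===== PORT A =====
def generate_n_sql_var (num : Int) : String :=
  (PySem.List.pyRange 0 num 1).foldl
    (fun output i => if i == 0 then "?" else output ++ ",?") ""

-- ===== PORT B =====
-- '("?," * num)[:-1]': Python's str*int clamps a negative count to 0 (num.toNat), [:-1] is the -1 slice.
def generate_n_sql_var_alt (num : Int) : String :=
  String.ofList (PySem.List.slice (List.flatten (List.replicate num.toNat "?,".toList)) none (some (-1)))

-- ===== PRECONDITION & SPEC =====
def Spec_generate_n_sql_var (num : Int) (out : String) : Prop := out = generate_n_sql_var_alt num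
instance (num : Int) (out : String) : Decidable (Spec_generate_n_sql_var num out) := by unfold Spec_generate_n_sql_var; infer_instance

-- ===== CLAIM (what is proved, stated in full; the proofs are below) =====
def Claim_equal_generate_n_sql_var : Prop := ∀ (num : Int), Dom_generate_n_sql_var num → Spec_generate_n_sql_var num (generate_n_sql_var num)

-- ===== LEMMAS AND PROOFS =====

-- dropping the last char of n+1 copies of "?," leaves n copies followed by '?'
theorem pv_dropLast_flat (n : Nat) :
    (List.flatten (List.replicate (n + 1) ['?', ','])).dropLast
      = List.flatten (List.replicate n ['?', ',']) ++ ['?'] := by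
  rw [List.replicate_succ', List.flatten_append]
  simp

-- the loop of A, for a positive count, produces the same list of characters
theorem pv_foldl_eq (n : Nat) :
    (PySem.List.pyRange 0 ((n : Int) + 1) 1).foldl
      (fun output i => if i == 0 then "?" else output ++ ",?") ""
      = String.ofList (List.flatten (List.replicate n ['?', ',']) ++ ['?']) := by
  induction n with
  | zero => decide
  | succ m ih =>
    push_cast
    rw [PySem.List.pyRange_one_succ_right (by omega : (0:Int) ≤ (m:Int) + 1),
        List.foldl_append]
    push_cast at ih ⊢
    rw [ih]
    have hne : ((m : Int) + 1 == 0) = false := by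
      simp
      omega
    rw [List.foldl_cons, List.foldl_nil, hne]
    simp only [Bool.false_eq_true, if_false]
    rw [List.replicate_succ', List.flatten_append]
    have hc : (",?" : String) = String.ofList [',', '?'] := rfl
    rw [hc, ← String.ofList_append]
    congr 1
    simp

theorem generate_n_sql_var_eq (num : Int) :
    generate_n_sql_var num = generate_n_sql_var_alt num := by
  unfold generate_n_sql_var generate_n_sql_var_alt
  rcases le_or_gt num 0 with h | h
  · rw [PySem.List.pyRange_one_eq_nil h]
    have : num.toNat = 0 := by omega
    rw [this]
    decide
  · obtain ⟨n, hn⟩ : ∃ n : Nat, num = (n : Int) + 1 :=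
      ⟨(num - 1).toNat, by omega⟩
    subst hn
    rw [pv_foldl_eq n, PySem.List.slice_to_neg_one]
    have : ((n : Int) + 1).toNat = n + 1 := by omega
    have h2 : "?,".toList = ['?', ','] := rfl
    rw [this, h2, pv_dropLast_flat]

-- ===== VERDICT (by name: the statement is the Claim_ definition above) =====
theorem generate_n_sql_var_spec : Claim_equal_generate_n_sql_var := by
  intro num _
  exact generate_n_sql_var_eq num
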